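-- pv_equiv track=rewrite | github.com/geniusworks/digital-archive-maker | bin/utils/clean_playlists.py | ensure_extm3u_header
-- ===== SOURCE A (Python) =====
-- def ensure_extm3u_header(content: str) -> str:
--     """Ensure #EXTM3U header is present."""
--     lines = content.split('\n')
--
--     # Find first non-empty line
--     first_non_empty = 0
--     while first_non_empty < len(lines) and not lines[first_non_empty].strip():
--         first_non_empty += 1
--
--     # If first non-empty line is not #EXTM3U, add it at the beginning
--     if (first_non_empty >= len(lines) or
--         not lines[first_non_empty].strip().startswith('#EXTM3U')):
--         lines.insert(0, '#EXTM3U')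
--
--     return '\n'.join(lines)
-- ===== SOURCE B (Python) =====
-- def ensure_extm3u_header(content: str) -> str:
--     """Ensure #EXTM3U header is present."""
--     if content.lstrip().startswith('#EXTM3U'):
--         return content
--     return '#EXTM3U\n' + content
-- ===== Notes on version B (the rewrite author's own statement) =====
-- stated objective: simpler
-- what changed: Replaces the split-into-lines / index-scan-for-first-non-empty-line / insert / rejoin pipeline with a single lstrip().startswith test and, when missing, a direct string prepend of '#EXTM3U\n'.
import Mathlib
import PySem

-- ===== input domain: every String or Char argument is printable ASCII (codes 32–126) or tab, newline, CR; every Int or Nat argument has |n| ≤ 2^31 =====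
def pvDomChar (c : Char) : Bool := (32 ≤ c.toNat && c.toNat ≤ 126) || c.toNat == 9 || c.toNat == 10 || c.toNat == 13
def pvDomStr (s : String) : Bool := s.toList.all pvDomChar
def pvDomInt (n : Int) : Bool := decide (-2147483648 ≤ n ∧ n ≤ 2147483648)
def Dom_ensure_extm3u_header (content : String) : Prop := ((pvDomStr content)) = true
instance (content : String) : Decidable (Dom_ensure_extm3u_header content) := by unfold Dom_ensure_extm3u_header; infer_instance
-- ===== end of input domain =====

-- B replaces A's split-into-lines / scan-for-first-non-empty-line / insert / rejoin pipeline by a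
-- single lstrip().startswith('#EXTM3U') test and, when the header is missing, a direct prepend of
-- "#EXTM3U\n" (objective: simpler).

-- ===== PORT A =====
-- the literal '#EXTM3U' of A
def pvPatA : List Char := ['#', 'E', 'X', 'T', 'M', '3', 'U']

-- A's while loop: advance first_non_empty while the current line strips to empty
def pvFindFirstNonEmpty (lines : List (List Char)) (i : Nat) : Nat :=
  if i < lines.length then
    if (PySem.Chars.strip (lines.getD i [])).isEmpty then pvFindFirstNonEmpty lines (i + 1) else i
  else i
termination_by lines.length - i
decreasing_by omega

def ensure_extm3u_header (content : String) : String :=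
  let lines := PySem.Chars.splitOn content.toList ['\n']
  let fne := pvFindFirstNonEmpty lines 0
  -- Python's short-circuit 'fne >= len(lines) or not lines[fne].strip().startswith(...)';
  -- lines.getD fne [] is only reached when fne < lines.length, matching lines[fne]
  let lines' :=
    if decide (lines.length ≤ fne)
        || !(PySem.Chars.startswith (PySem.Chars.strip (lines.getD fne [])) pvPatA) then
      pvPatA :: lines          -- lines.insert(0, '#EXTM3U')
    else lines
  String.ofList (PySem.Chars.join ['\n'] lines')

-- ===== PORT B =====
def ensure_extm3u_header_alt (content : String) : String :=
  if PySem.Chars.startswith (PySem.Chars.lstrip content.toList) pvPatA then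
    content
  else
    String.ofList (pvPatA ++ '\n' :: content.toList)   -- '#EXTM3U\n' + content

-- ===== PRECONDITION & SPEC =====
def Spec_ensure_extm3u_header (content : String) (out : String) : Prop := out = ensure_extm3u_header_alt content
instance (content : String) (out : String) : Decidable (Spec_ensure_extm3u_header content out) := by unfold Spec_ensure_extm3u_header; infer_instance

-- ===== CLAIM (what is proved, stated in full; the proofs are below) =====
def Claim_equal_ensure_extm3u_header : Prop := ∀ (content : String), Dom_ensure_extm3u_header content → Spec_ensure_extm3u_header content (ensure_extm3u_header content)

-- ===== LEMMAS AND PROOFS =====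

-- no character of '#EXTM3U' is whitespace
set_option maxRecDepth 10000 in
theorem pvPat_no_ws : ∀ c ∈ pvPatA, PySem.Chars.isspace c = false := by
  intro c hc
  simp only [pvPatA, List.mem_cons, List.not_mem_nil, or_false] at hc
  rcases hc with rfl|rfl|rfl|rfl|rfl|rfl|rfl <;> decide

set_option maxRecDepth 10000 in
theorem pv_nl_ws : PySem.Chars.isspace '\n' = true := by decide

-- appending a tail that begins with a whitespace character does not affect startswith '#EXTM3U'
theorem pv_startswith_append_ws (u : List Char) (c : Char) (t : List Char)
    (hc : PySem.Chars.isspace c = true) :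
    PySem.Chars.startswith (u ++ c :: t) pvPatA = PySem.Chars.startswith u pvPatA := by
  simp only [PySem.Chars.startswith]
  rw [Bool.eq_iff_iff, List.isPrefixOf_iff_prefix, List.isPrefixOf_iff_prefix]
  constructor
  · intro hp
    by_cases hl : pvPatA.length ≤ u.length
    · have hp' := List.prefix_iff_eq_take.1 hp
      rw [List.take_append_of_le_length hl] at hp'
      exact hp' ▸ List.take_prefix _ _
    · exfalso
      have hlt : u.length < pvPatA.length := by omega
      have h1 := hp.getElem (i := u.length) hlt
      have h2 : pvPatA[u.length] = c := by rw [h1]; simp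
      have h3 := pvPat_no_ws _ (h2 ▸ List.getElem_mem hlt)
      rw [hc] at h3
      exact absurd h3 (by simp)
  · intro hp
    exact hp.trans (List.prefix_append u (c :: t))

-- rstrip (removing trailing whitespace) does not affect startswith '#EXTM3U'
theorem pv_startswith_rstrip (ds : List Char) :
    PySem.Chars.startswith (PySem.Chars.rstrip ds) pvPatA = PySem.Chars.startswith ds pvPatA := by
  have hdecomp : PySem.Chars.rstrip ds ++ (ds.reverse.takeWhile PySem.Chars.isspace).reverse = ds := by
    simp only [PySem.Chars.rstrip]
    rw [← List.reverse_append, List.takeWhile_append_dropWhile, List.reverse_reverse]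
  rcases hw : (ds.reverse.takeWhile PySem.Chars.isspace).reverse with _ | ⟨c, t⟩
  · rw [hw] at hdecomp; simp only [List.append_nil] at hdecomp; rw [hdecomp]
  · have hc : PySem.Chars.isspace c = true := by
      apply List.mem_takeWhile_imp (l := ds.reverse)
      have : c ∈ (ds.reverse.takeWhile PySem.Chars.isspace).reverse := by rw [hw]; simp
      simpa using this
    rw [hw] at hdecomp
    conv_rhs => rw [← hdecomp]
    rw [pv_startswith_append_ws _ _ _ hc]

-- lstrip of a list is empty iff every character is whitespace
theorem pv_lstrip_eq_nil_iff (l : List Char) :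
    PySem.Chars.lstrip l = [] ↔ ∀ c ∈ l, PySem.Chars.isspace c = true := by
  simp [PySem.Chars.lstrip, List.dropWhile_eq_nil_iff]

-- strip l is empty iff lstrip l is empty
theorem pv_strip_empty_iff (l : List Char) :
    (PySem.Chars.strip l).isEmpty = true ↔ PySem.Chars.lstrip l = [] := by
  constructor
  · intro h
    simp only [PySem.Chars.strip, PySem.Chars.rstrip, List.isEmpty_iff] at h
    have hall : ∀ c ∈ (PySem.Chars.lstrip l).reverse, PySem.Chars.isspace c = true := by
      rw [← List.dropWhile_eq_nil_iff]
      simpa using h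
    rcases hd : PySem.Chars.lstrip l with _ | ⟨c, t⟩
    · rfl
    · exfalso
      have hnil : List.dropWhile PySem.Chars.isspace l ≠ [] := by
        simp only [PySem.Chars.lstrip] at hd; rw [hd]; simp
      have hc0 := List.head_dropWhile_not PySem.Chars.isspace hnil
      have hch : (List.dropWhile PySem.Chars.isspace l).head hnil = c := by
        simp only [PySem.Chars.lstrip] at hd; simp [hd]
      rw [hch] at hc0
      have := hall c (by simp [hd])
      rw [hc0] at this; exact absurd this (by simp)
  · intro h
    simp [PySem.Chars.strip, PySem.Chars.rstrip, h]

-- A's header test over the line list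
def pvHdrFound : List (List Char) → Bool
  | [] => false
  | l :: ls =>
      if (PySem.Chars.strip l).isEmpty then pvHdrFound ls
      else PySem.Chars.startswith (PySem.Chars.strip l) pvPatA

-- A's while loop followed by its if-condition computes !pvHdrFound of the remaining lines
theorem pv_loop_eq (lines : List (List Char)) (i : Nat) :
    (decide (lines.length ≤ pvFindFirstNonEmpty lines i)
      || !(PySem.Chars.startswith (PySem.Chars.strip (lines.getD (pvFindFirstNonEmpty lines i) [])) pvPatA))
      = !pvHdrFound (lines.drop i) := by
  by_cases h : i < lines.length
  · by_cases he : (PySem.Chars.strip (lines.getD i [])).isEmpty = true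
    · have hj : pvFindFirstNonEmpty lines i = pvFindFirstNonEmpty lines (i + 1) := by
        rw [pvFindFirstNonEmpty, if_pos h, if_pos he]
      rw [hj, pv_loop_eq lines (i + 1)]
      rw [List.drop_eq_getElem_cons h, pvHdrFound]
      rw [List.getD_eq_getElem _ _ h] at he
      rw [if_pos he]
    · have hj : pvFindFirstNonEmpty lines i = i := by
        rw [pvFindFirstNonEmpty, if_pos h, if_neg he]
      rw [hj, List.drop_eq_getElem_cons h, pvHdrFound]
      rw [List.getD_eq_getElem _ _ h] at he
      rw [if_neg he, List.getD_eq_getElem _ _ h]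
      simp [Nat.not_le.2 h]
  · have hj : pvFindFirstNonEmpty lines i = i := by
      rw [pvFindFirstNonEmpty, if_neg h]
    rw [hj, List.drop_eq_nil_of_le (by omega), pvHdrFound]
    simp [Nat.le_of_not_lt h]
termination_by lines.length - i
decreasing_by omega

-- join of a single piece
theorem pv_join_single (sep x : List Char) : PySem.Chars.join sep [x] = x := by
  simp [PySem.Chars.join, List.intercalate]

-- join with a nonempty tail
theorem pv_join_cons_cons (sep x y : List Char) (zs : List (List Char)) :
    PySem.Chars.join sep (x :: y :: zs) = x ++ sep ++ PySem.Chars.join sep (y :: zs) := by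
  simp [PySem.Chars.join, List.intercalate, List.append_assoc]

theorem pv_join_cons_ne (sep x : List Char) (T : List (List Char)) (h : T ≠ []) :
    PySem.Chars.join sep (x :: T) = x ++ sep ++ PySem.Chars.join sep T := by
  rcases T with _ | ⟨y, zs⟩
  · exact absurd rfl h
  · exact pv_join_cons_cons sep x y zs

-- merging the last two pieces with the separator between them preserves the join
theorem pv_join_pair (sep : List Char) :
    ∀ (A : List (List Char)) (x y : List Char),
    PySem.Chars.join sep (A ++ [x, y]) = PySem.Chars.join sep (A ++ [x ++ sep ++ y])
  | [], x, y => by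
      rw [List.nil_append, List.nil_append, pv_join_cons_cons, pv_join_single, pv_join_single,
        List.append_assoc]
  | a :: A, x, y => by
      rw [List.cons_append, pv_join_cons_ne sep a _ (by simp), List.cons_append,
        pv_join_cons_ne sep a _ (by simp), pv_join_pair sep A x y]

-- invariant of splitOn.go: joining the pieces back restores the scanned text
theorem pv_go_join (sep : List Char) (hsep : sep ≠ []) :
    ∀ (fuel : Nat) (l cur : List Char) (acc : List (List Char)), l.length < fuel →
    PySem.Chars.join sep (PySem.Chars.splitOn.go sep fuel l cur acc)
      = PySem.Chars.join sep (acc.reverse ++ [cur.reverse ++ l])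
  | 0, l, cur, acc => by intro h; exact absurd h (by omega)
  | fuel + 1, [], cur, acc => by
      intro _
      rw [PySem.Chars.splitOn.go]
      · simp
      · omega
  | fuel + 1, c :: rest, cur, acc => by
      intro hlen
      rw [PySem.Chars.splitOn.go]
      by_cases hp : sep.isPrefixOf (c :: rest) = true
      · rw [if_pos hp]
        obtain ⟨t, ht⟩ := List.isPrefixOf_iff_prefix.1 hp
        have hs : 1 ≤ sep.length := by
          rcases sep with _ | _
          · exact absurd rfl hsep
          · simp
        have hdrop : (c :: rest).drop sep.length = t := by
          rw [← ht, List.drop_left]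
        have hlen' : ((c :: rest).drop sep.length).length < fuel := by
          simp only [List.length_drop]
          have : (c :: rest).length = rest.length + 1 := by simp
          omega
        rw [pv_go_join sep hsep fuel _ [] (cur.reverse :: acc) hlen']
        rw [hdrop, List.reverse_cons]
        rw [show (acc.reverse ++ [cur.reverse]) ++ [List.reverse [] ++ t]
              = acc.reverse ++ [cur.reverse, t] by simp]
        rw [pv_join_pair]
        rw [← ht]
        simp [List.append_assoc]
      · rw [if_neg hp]
        have hlen' : rest.length < fuel := by
          have : (c :: rest).length = rest.length + 1 := by simp
          omega
        rw [pv_go_join sep hsep fuel rest (c :: cur) acc hlen']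
        simp

-- splitting and rejoining on '\n' is the identity
theorem pv_join_splitOn (cs : List Char) :
    PySem.Chars.join ['\n'] (PySem.Chars.splitOn cs ['\n']) = cs := by
  rw [PySem.Chars.splitOn, pv_go_join _ (by simp) _ _ _ _ (by omega)]
  simp

-- splitOn never returns the empty list
theorem pv_go_ne_nil (sep : List Char) :
    ∀ (fuel : Nat) (l cur : List Char) (acc : List (List Char)),
    PySem.Chars.splitOn.go sep fuel l cur acc ≠ []
  | 0, l, cur, acc => by rw [PySem.Chars.splitOn.go]; simp
  | fuel + 1, [], cur, acc => by
      rw [PySem.Chars.splitOn.go]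
      · simp
      · omega
  | fuel + 1, c :: rest, cur, acc => by
      rw [PySem.Chars.splitOn.go]
      by_cases hp : sep.isPrefixOf (c :: rest) = true
      · rw [if_pos hp]; exact pv_go_ne_nil sep fuel _ _ _
      · rw [if_neg hp]; exact pv_go_ne_nil sep fuel _ _ _

theorem pv_splitOn_ne_nil (cs : List Char) : PySem.Chars.splitOn cs ['\n'] ≠ [] := by
  rw [PySem.Chars.splitOn]; exact pv_go_ne_nil _ _ _ _ _

-- lstrip skips an all-whitespace prefix
theorem pv_lstrip_ws_append (l t : List Char) (hws : ∀ c ∈ l, PySem.Chars.isspace c = true) :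
    PySem.Chars.lstrip (l ++ t) = PySem.Chars.lstrip t := by
  simp only [PySem.Chars.lstrip, List.dropWhile_append]
  rw [if_pos]
  rw [List.isEmpty_iff, List.dropWhile_eq_nil_iff]
  exact hws

-- lstrip stops inside a prefix that is not all whitespace
theorem pv_lstrip_nonws_append (l t : List Char) (h : PySem.Chars.lstrip l ≠ []) :
    PySem.Chars.lstrip (l ++ t) = PySem.Chars.lstrip l ++ t := by
  simp only [PySem.Chars.lstrip, List.dropWhile_append] at *
  rw [if_neg]
  rw [List.isEmpty_iff]
  exact h

-- lstrip skips a leading newline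
theorem pv_lstrip_cons_nl (t : List Char) :
    PySem.Chars.lstrip ('\n' :: t) = PySem.Chars.lstrip t := by
  simp only [PySem.Chars.lstrip, List.dropWhile_cons, pv_nl_ws, if_pos]

-- the scan over lines equals lstrip-then-startswith on the joined text
theorem pv_hdrFound_eq (lines : List (List Char)) :
    pvHdrFound lines
      = PySem.Chars.startswith (PySem.Chars.lstrip (PySem.Chars.join ['\n'] lines)) pvPatA := by
  induction lines with
  | nil =>
      rw [pvHdrFound]
      rw [show PySem.Chars.join ['\n'] [] = [] by simp [PySem.Chars.join, List.intercalate]]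
      rw [show PySem.Chars.lstrip [] = [] by rfl]
      rw [show PySem.Chars.startswith [] pvPatA = false by rfl]
  | cons l ls ih =>
      rw [pvHdrFound]
      by_cases he : (PySem.Chars.strip l).isEmpty = true
      · rw [if_pos he]
        have hws : ∀ c ∈ l, PySem.Chars.isspace c = true :=
          (pv_lstrip_eq_nil_iff l).1 ((pv_strip_empty_iff l).1 he)
        rcases ls with _ | ⟨m, ms⟩
        · rw [pvHdrFound, pv_join_single]
          rw [show PySem.Chars.lstrip l = [] from (pv_lstrip_eq_nil_iff l).2 hws]
          rw [show PySem.Chars.startswith [] pvPatA = false by rfl]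
        · rw [pv_join_cons_cons, List.append_assoc]
          rw [pv_lstrip_ws_append l _ hws]
          rw [show ['\n'] ++ PySem.Chars.join ['\n'] (m :: ms)
                = '\n' :: PySem.Chars.join ['\n'] (m :: ms) by rfl]
          rw [pv_lstrip_cons_nl]
          exact ih
      · rw [if_neg he]
        have hl : PySem.Chars.lstrip l ≠ [] := fun h => he ((pv_strip_empty_iff l).2 h)
        have hstrip : PySem.Chars.startswith (PySem.Chars.strip l) pvPatA
            = PySem.Chars.startswith (PySem.Chars.lstrip l) pvPatA := by
          rw [show PySem.Chars.strip l = PySem.Chars.rstrip (PySem.Chars.lstrip l) from rfl]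
          exact pv_startswith_rstrip (PySem.Chars.lstrip l)
        rcases ls with _ | ⟨m, ms⟩
        · rw [pv_join_single, hstrip]
        · rw [pv_join_cons_cons, List.append_assoc]
          rw [pv_lstrip_nonws_append l _ hl]
          rw [show ['\n'] ++ PySem.Chars.join ['\n'] (m :: ms)
                = '\n' :: PySem.Chars.join ['\n'] (m :: ms) by rfl]
          rw [pv_startswith_append_ws _ '\n' _ pv_nl_ws]
          exact hstrip

-- ===== VERDICT (by name: the statement is the Claim_ definition above) =====
theorem ensure_extm3u_header_spec : Claim_equal_ensure_extm3u_header := by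
  intro content _
  unfold Spec_ensure_extm3u_header ensure_extm3u_header ensure_extm3u_header_alt
  have hcond : (decide ((PySem.Chars.splitOn content.toList ['\n']).length
        ≤ pvFindFirstNonEmpty (PySem.Chars.splitOn content.toList ['\n']) 0)
      || !(PySem.Chars.startswith (PySem.Chars.strip
            ((PySem.Chars.splitOn content.toList ['\n']).getD
              (pvFindFirstNonEmpty (PySem.Chars.splitOn content.toList ['\n']) 0) [])) pvPatA))
      = !(PySem.Chars.startswith (PySem.Chars.lstrip content.toList) pvPatA) := by
    rw [pv_loop_eq, List.drop_zero, pv_hdrFound_eq, pv_join_splitOn]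
  by_cases h : PySem.Chars.startswith (PySem.Chars.lstrip content.toList) pvPatA = true
  · rw [h] at hcond
    simp only [hcond, Bool.not_true, Bool.false_eq_true, if_false, if_pos h]
    rw [pv_join_splitOn]
    exact String.ofList_toList
  · rw [Bool.not_eq_true] at h
    rw [h] at hcond
    simp only [hcond, Bool.not_false, if_true, h, Bool.false_eq_true, if_false]
    rw [pv_join_cons_ne _ _ _ (pv_splitOn_ne_nil content.toList), pv_join_splitOn]
    rfl
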